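-- pv_equiv track=rewrite | github.com/pypi-data/pypi-mirror-376 | packages/MTGProxyPrinter/mtgproxyprinter-0.34.0.tar.gz/mtgproxyprinter-0.34.0/mtg_proxy_printer/document_controller/move_cards.py | _to_list_of_ranges
-- ===== SOURCE A (Python) =====
-- from collections.abc import Sequence
-- import itertools
--
-- def _to_list_of_ranges(sequence: Sequence[int]) -> list[tuple[int, int]]:
--     ranges: list[tuple[int, int]] = []
--     sequence = itertools.chain(sequence, (sentinel := object(),))
--     lower = upper = next(sequence)
--     for item in sequence:
--         if item is sentinel or upper != item-1:
--             ranges.append((lower, upper))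
--             lower = upper = item
--         else:
--             upper = item
--     return ranges
-- ===== SOURCE B (Python) =====
-- import itertools
--
-- def _to_list_of_ranges(sequence):
--     ranges = []
--     for _, group in itertools.groupby(enumerate(sequence), key=lambda p: p[1] - p[0]):
--         group = list(group)
--         ranges.append((group[0][1], group[-1][1]))
--     return ranges
-- ===== Notes on version B (the rewrite author's own statement) =====
-- stated objective: idiomatic
-- what changed: Replaces the sentinel-object chain and manual lower/upper state machine by itertools.groupby over enumerate with key value-minus-index, emitting (first, last) of each group.
import Mathlib
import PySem

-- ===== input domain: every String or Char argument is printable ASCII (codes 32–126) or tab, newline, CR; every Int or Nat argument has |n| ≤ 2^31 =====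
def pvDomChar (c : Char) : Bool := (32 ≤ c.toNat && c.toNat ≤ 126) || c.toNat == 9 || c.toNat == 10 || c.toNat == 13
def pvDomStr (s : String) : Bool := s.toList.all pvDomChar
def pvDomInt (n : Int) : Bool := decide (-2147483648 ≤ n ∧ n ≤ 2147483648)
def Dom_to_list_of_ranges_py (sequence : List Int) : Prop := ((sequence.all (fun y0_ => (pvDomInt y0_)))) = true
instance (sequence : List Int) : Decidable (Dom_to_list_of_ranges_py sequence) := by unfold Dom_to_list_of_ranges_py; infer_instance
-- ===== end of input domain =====

-- B replaces A's sentinel-chain lower/upper state machine by itertools.groupby over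
-- enumerate with key value-minus-index (more idiomatic, same O(n) cost).


-- ===== PORT A =====
-- the for-loop over the rest of the chain: state (lower, upper, ranges); the final sentinel
-- iteration always appends (lower, upper), so it becomes the base case.
def pvLoopA (xs : List Int) (lower upper : Int) (ranges : List (Int × Int)) :
    List (Int × Int) :=
  match xs with
  | [] => ranges ++ [(lower, upper)]
  | item :: rest =>
      if upper ≠ item - 1 then pvLoopA rest item item (ranges ++ [(lower, upper)])
      else pvLoopA rest lower item ranges

def to_list_of_ranges_py (sequence : List Int) : List (Int × Int) :=
  match sequence with
  | [] => []            -- next() yields the sentinel, the loop body never runs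
  | x :: xs => pvLoopA xs x x []

-- ===== PORT B =====
-- enumerate(sequence) starting at index i
def pvEnumI (i : Int) (xs : List Int) : List (Int × Int) :=
  match xs with
  | [] => []
  | x :: rest => (i, x) :: pvEnumI (i + 1) rest

-- itertools.groupby with key p[1] - p[0]: consume left to right, materializing each group
def pvGroupRun (k : Int) (cur : List (Int × Int)) (ps : List (Int × Int)) :
    List (List (Int × Int)) :=
  match ps with
  | [] => [cur]
  | p :: rest =>
      if p.2 - p.1 = k then pvGroupRun k (cur ++ [p]) rest
      else cur :: pvGroupRun (p.2 - p.1) [p] rest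

def pvGroupBy (ps : List (Int × Int)) : List (List (Int × Int)) :=
  match ps with
  | [] => []
  | p :: rest => pvGroupRun (p.2 - p.1) [p] rest

-- group[0][1] and group[-1][1]
def pvFirstLast (g : List (Int × Int)) : Int × Int :=
  ((g.headD (0, 0)).2, (g.getLastD (0, 0)).2)

def to_list_of_ranges_py_alt (sequence : List Int) : List (Int × Int) :=
  (pvGroupBy (pvEnumI 0 sequence)).map pvFirstLast

-- ===== PRECONDITION & SPEC =====
def Spec_to_list_of_ranges_py (sequence : List Int) (out : List (Int × Int)) : Prop := out = to_list_of_ranges_py_alt sequence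
instance (sequence : List Int) (out : List (Int × Int)) : Decidable (Spec_to_list_of_ranges_py sequence out) := by unfold Spec_to_list_of_ranges_py; infer_instance

-- ===== CLAIM (what is proved, stated in full; the proofs are below) =====
def Claim_equal_to_list_of_ranges_py : Prop := ∀ (sequence : List Int), Dom_to_list_of_ranges_py sequence → Spec_to_list_of_ranges_py sequence (to_list_of_ranges_py sequence)

-- ===== LEMMAS AND PROOFS =====

-- middle spec: A's loop without the accumulator
def pvSpecRun (lower upper : Int) (xs : List Int) : List (Int × Int) :=
  match xs with
  | [] => [(lower, upper)]
  | x :: rest =>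
      if upper ≠ x - 1 then (lower, upper) :: pvSpecRun x x rest
      else pvSpecRun lower x rest

theorem pvLoopA_eq (xs : List Int) :
    ∀ lower upper ranges, pvLoopA xs lower upper ranges = ranges ++ pvSpecRun lower upper xs := by
  induction xs with
  | nil => intro l u r; simp [pvLoopA, pvSpecRun]
  | cons x rest ih =>
      intro l u r
      simp only [pvLoopA, pvSpecRun]
      by_cases h : u ≠ x - 1 <;> simp [h, ih]

theorem pvGroupRun_eq (xs : List Int) :
    ∀ (i k : Int) (cur : List (Int × Int)), cur ≠ [] →
      (pvFirstLast cur).2 = k + i - 1 →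
      (pvGroupRun k cur (pvEnumI i xs)).map pvFirstLast
        = pvSpecRun (pvFirstLast cur).1 (pvFirstLast cur).2 xs := by
  induction xs with
  | nil => intro i k cur _ _; simp [pvEnumI, pvGroupRun, pvSpecRun]
  | cons x rest ih =>
      intro i k cur hne hk
      simp only [pvEnumI, pvGroupRun, pvSpecRun]
      by_cases h : x - i = k
      · have hnot : ¬ (pvFirstLast cur).2 ≠ x - 1 := by omega
        simp only [if_pos h, if_neg hnot]
        have h1 : (pvFirstLast (cur ++ [(i, x)])).1 = (pvFirstLast cur).1 := by
          cases cur with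
          | nil => exact absurd rfl hne
          | cons a t => simp [pvFirstLast]
        have h2 : (pvFirstLast (cur ++ [(i, x)])).2 = x := by
          simp [pvFirstLast]
        have := ih (i + 1) k (cur ++ [(i, x)]) (by simp) (by rw [h2]; omega)
        rw [this, h1, h2]
      · have hyes : (pvFirstLast cur).2 ≠ x - 1 := by omega
        simp only [if_neg h, if_pos hyes, List.map_cons]
        have := ih (i + 1) (x - i) [(i, x)] (by simp) (by simp [pvFirstLast]; ring)
        rw [this]
        simp [pvFirstLast]

-- ===== VERDICT (by name: the statement is the Claim_ definition above) =====
theorem to_list_of_ranges_py_spec : Claim_equal_to_list_of_ranges_py := by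
  intro sequence _
  unfold Spec_to_list_of_ranges_py
  cases sequence with
  | nil => simp [to_list_of_ranges_py, to_list_of_ranges_py_alt, pvEnumI, pvGroupBy]
  | cons x xs =>
      show pvLoopA xs x x [] = _
      rw [pvLoopA_eq]
      unfold to_list_of_ranges_py_alt
      simp only [pvEnumI, pvGroupBy]
      have := pvGroupRun_eq xs 1 (x - 0) [(0, x)] (by simp) (by simp [pvFirstLast])
      simp [pvFirstLast] at this
      simp [this]
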